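-- pv_equiv track=rewrite | github.com/rphlo/py-retricon | retricon.py | fillPixelsVSym
-- ===== SOURCE A (Python) =====
-- import hashlib, math
--
-- def fillPixelsVSym(id, dimension):
--     mid = int(math.ceil(dimension / 2.0))
--     odd = dimension % 2 != 0
--
--     pic = [0]*dimension
--     for row in range(dimension):
--         pic[row] = [0]*dimension
--         for col in range(dimension):
--             p = row * mid + col
--             if col >= mid:
--                 d = mid - col
--                 if odd:
--                     d -= 1
--                 ad = abs(d)
--                 p = row * mid + mid - 1 - ad
--             pic[row][col] = id['pixels'][p]
--
--     return pic
-- ===== SOURCE B (Python) =====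
-- import math
--
-- def fillPixelsVSym(id, dimension):
--     mid = int(math.ceil(dimension / 2.0))
--     pic = []
--     for row in range(dimension):
--         left = [id['pixels'][row * mid + c] for c in range(mid)]
--         half = left[:-1] if dimension % 2 != 0 else left
--         pic.append(left + half[::-1])
--     return pic
-- ===== Notes on version B (the rewrite author's own statement) =====
-- stated objective: simpler
-- what changed: B drops A's per-column mirrored-index arithmetic (abs/branch on every cell of a dimension x dimension double loop) and instead builds only the left half of each row by direct indexing, then appends its reversal (excluding the centre column when dimension is odd).
import Mathlib
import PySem

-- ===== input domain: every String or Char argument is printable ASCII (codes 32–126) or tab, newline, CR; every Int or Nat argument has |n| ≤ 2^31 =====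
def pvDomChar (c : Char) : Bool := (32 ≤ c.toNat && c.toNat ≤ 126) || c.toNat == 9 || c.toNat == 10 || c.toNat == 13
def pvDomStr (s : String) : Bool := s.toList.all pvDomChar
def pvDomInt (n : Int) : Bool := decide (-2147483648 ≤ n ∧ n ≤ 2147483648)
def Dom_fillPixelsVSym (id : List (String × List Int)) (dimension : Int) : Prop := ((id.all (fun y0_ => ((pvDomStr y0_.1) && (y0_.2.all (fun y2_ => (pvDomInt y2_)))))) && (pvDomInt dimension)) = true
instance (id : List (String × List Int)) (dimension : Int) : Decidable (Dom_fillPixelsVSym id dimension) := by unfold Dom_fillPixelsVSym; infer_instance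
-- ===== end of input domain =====

-- B builds each row as the explicit left half plus its reflection (dropping the
-- centre column when the dimension is odd) instead of A's per-column mirrored
-- index arithmetic; objective: simpler decomposition, same cost.

-- ===== PORT A =====
-- int(math.ceil(dimension / 2.0)) is exact ceiling division for |dimension| ≤ 2^31,
-- ported as -((-dimension) // 2).
def fillPixelsVSym (id : List (String × List Int)) (dimension : Int) : List (List Int) :=
  let mid : Int := -(PySem.Int.floordiv (-dimension) 2)
  let odd : Bool := !(PySem.Int.mod dimension 2 == 0)
  (PySem.List.pyRange 0 dimension 1).map (fun row =>
    (PySem.List.pyRange 0 dimension 1).map (fun col =>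
      let p : Int :=
        if mid ≤ col then
          let d := mid - col
          let d := if odd then d - 1 else d
          row * mid + mid - 1 - |d|
        else row * mid + col
      PySem.List.pyGetD (((PySem.Dict.mk id).get? "pixels").getD []) p 0))

-- ===== PORT B =====
def fillPixelsVSym_alt (id : List (String × List Int)) (dimension : Int) : List (List Int) :=
  let mid : Int := -(PySem.Int.floordiv (-dimension) 2)
  (PySem.List.pyRange 0 dimension 1).foldl (fun pic row =>
    let left := (PySem.List.pyRange 0 mid 1).map (fun c =>
      PySem.List.pyGetD (((PySem.Dict.mk id).get? "pixels").getD []) (row * mid + c) 0)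
    let half := if !(PySem.Int.mod dimension 2 == 0) then PySem.List.slice left none (some (-1)) else left
    pic ++ [left ++ (PySem.List.slice? half none none (-1)).getD []]) []

-- ===== PRECONDITION & SPEC =====
-- Pre_ excludes exactly the inputs where A raises: for a positive dimension the
-- dict must have a "pixels" entry with at least dimension * ceil(dimension/2)
-- entries, otherwise Python raises KeyError / IndexError.  (dimension ≤ 0 returns [].)
def Pre_fillPixelsVSym (id : List (String × List Int)) (dimension : Int) : Prop :=
  dimension ≤ 0 ∨
    (((PySem.Dict.mk id).get? "pixels").isSome = true ∧
      dimension * ((dimension + 1) / 2) ≤ (((PySem.Dict.mk id).get? "pixels").getD []).length)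
instance (id : List (String × List Int)) (dimension : Int) : Decidable (Pre_fillPixelsVSym id dimension) := by unfold Pre_fillPixelsVSym; infer_instance

def pvWitness_fillPixelsVSym : (List (String × List Int)) × Int :=
  ([("pixels", [1, 2, 3, 4, 5, 6])], 3)

def Spec_fillPixelsVSym (id : List (String × List Int)) (dimension : Int) (out : List (List Int)) : Prop := out = fillPixelsVSym_alt id dimension
instance (id : List (String × List Int)) (dimension : Int) (out : List (List Int)) : Decidable (Spec_fillPixelsVSym id dimension out) := by unfold Spec_fillPixelsVSym; infer_instance

-- ===== CLAIM (what is proved, stated in full; the proofs are below) =====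
def Claim_equal_fillPixelsVSym : Prop := ∀ (id : List (String × List Int)) (dimension : Int), Dom_fillPixelsVSym id dimension → Pre_fillPixelsVSym id dimension → Spec_fillPixelsVSym id dimension (fillPixelsVSym id dimension)

-- ===== LEMMAS AND PROOFS =====

-- ceil characterisation of the shared `mid`
lemma mid_bounds (dimension : Int) :
    ((-(PySem.Int.floordiv (-dimension) 2)) - 1) * 2 < dimension ∧
      dimension ≤ (-(PySem.Int.floordiv (-dimension) 2)) * 2 :=
  (PySem.Int.neg_floordiv_neg_eq_iff_of_pos (by norm_num)).mp rfl

-- the one row-level fact: A's mirrored indexing equals B's left-half + reflection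
lemma row_eq (pixels : List Int) (dimension row m : Int)
    (hm1 : (m - 1) * 2 < dimension) (hm2 : dimension ≤ m * 2)
    (hrow : 0 ≤ row) (hrd : row < dimension) :
    ((PySem.List.pyRange 0 dimension 1).map (fun col =>
      let p : Int :=
        if m ≤ col then
          let d := m - col
          let d := if !(PySem.Int.mod dimension 2 == 0) then d - 1 else d
          row * m + m - 1 - |d|
        else row * m + col
      PySem.List.pyGetD pixels p 0)) =
    (let left := (PySem.List.pyRange 0 m 1).map (fun c =>
        PySem.List.pyGetD pixels (row * m + c) 0)
     let half := if !(PySem.Int.mod dimension 2 == 0) then PySem.List.slice left none (some (-1)) else left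
     left ++ (PySem.List.slice? half none none (-1)).getD []) := by
  have hdpos : 0 < dimension := by omega
  have hmled : 0 ≤ m ∧ m ≤ dimension := by omega
  simp only [PySem.List.slice?_none_none_neg_one, Option.getD_some]
  rw [PySem.List.pyRange_one_append 0 m dimension hmled.1 hmled.2, List.map_append]
  congr 1
  · -- left part: columns 0 ≤ col < m take the direct branch
    apply List.map_congr_left
    intro col hcol
    rw [PySem.List.mem_pyRange_one] at hcol
    simp only [if_neg (by omega : ¬ m ≤ col)]
  · -- right part: columns m ≤ col < dimension are the reflection of the left half
    rcases Int.emod_two_eq dimension with h | h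
    · -- even dimension: dimension = 2 * m
      have hb : (!(PySem.Int.mod dimension 2 == 0)) = false := by simp [h]
      simp only [hb, Bool.false_eq_true, if_false]
      apply List.ext_getElem
      · simp only [List.length_map, PySem.List.length_pyRange_one, List.length_reverse]
        omega
      · intro i hi1 hi2
        simp only [List.length_map, PySem.List.length_pyRange_one] at hi1
        simp only [List.getElem_map, List.getElem_reverse, List.length_map,
          PySem.List.length_pyRange_one, PySem.List.getElem_pyRange_one]
        rw [if_pos (by omega : m ≤ m + (i : Int))]
        congr 1
        rw [abs_of_nonpos (by omega)]
        omega
    · -- odd dimension: dimension = 2 * m - 1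
      have hb : (!(PySem.Int.mod dimension 2 == 0)) = true := by simp [h]
      simp only [hb, if_true, PySem.List.slice_to_neg_one]
      apply List.ext_getElem
      · simp only [List.length_map, PySem.List.length_pyRange_one, List.length_reverse,
          List.length_dropLast]
        omega
      · intro i hi1 hi2
        simp only [List.length_map, PySem.List.length_pyRange_one] at hi1
        simp only [List.getElem_map, List.getElem_reverse, List.getElem_dropLast,
          List.length_map, List.length_dropLast, PySem.List.length_pyRange_one,
          PySem.List.getElem_pyRange_one]
        rw [if_pos (by omega : m ≤ m + (i : Int))]
        congr 1
        rw [abs_of_nonpos (by omega)]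
        omega

-- ===== VERDICT (by name: the statement is the Claim_ definition above) =====
theorem fillPixelsVSym_spec : Claim_equal_fillPixelsVSym := by
  intro id dimension _hdom hpre
  unfold Spec_fillPixelsVSym
  show fillPixelsVSym id dimension = fillPixelsVSym_alt id dimension
  simp only [fillPixelsVSym, fillPixelsVSym_alt]
  rw [PySem.List.foldl_append_singleton_eq_map]
  by_cases hd : dimension ≤ 0
  · rw [PySem.List.pyRange_one_eq_nil (by omega), List.map_nil, List.map_nil]
    rfl
  · have hm := mid_bounds dimension
    apply List.map_congr_left
    intro row hrow
    rw [PySem.List.mem_pyRange_one] at hrow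
    exact row_eq _ dimension row _ hm.1 hm.2 hrow.1 hrow.2
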